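-- pv_equiv track=rewrite | github.com/SharadGupta26/Algoexpert | testing.py | min_efforts_to_collect_books
-- ===== SOURCE A (Python) =====
-- def min_efforts_to_collect_books(A, B):
--     A.sort(reverse=True)
--     n = len(A)
--     merge_count = [0] * n
--     efforts = 0
--
--     for i in range(1, n):
--         j = i - 1
--         while j >= 0 and merge_count[j] == B:
--             j -= 1
--
--         if j >= 0:
--             efforts += A[i] * (merge_count[j] + 1)  # Efforts required to merge the current stack with the previous one
--             A[j] += A[i]  # Merge the stacks by updating the size of the previous stack
--             merge_count[j] += 1  # Update the merge_count for the previous stack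
--
--     return efforts
-- ===== SOURCE B (Python) =====
-- def min_efforts_to_collect_books(A, B):
--     # For B != 0 every stack i>0 merges once into its (never-full) predecessor
--     # at multiplier 1, so the effort is sum(A) - max(A); for B == 0 no merge is allowed.
--     # Note: unlike A, this does not mutate A (return-value equivalence only).
--     if B == 0 or not A:
--         return 0
--     return sum(A) - max(A)
-- ===== Notes on version B (the rewrite author's own statement) =====
-- stated objective: faster
-- what changed: Replaced the sort plus quadratic merge simulation by the closed form sum(A)-max(A) for B!=0 (0 for B==0), since the predecessor stack's merge count is always 0 at merge time.
import Mathlib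
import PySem

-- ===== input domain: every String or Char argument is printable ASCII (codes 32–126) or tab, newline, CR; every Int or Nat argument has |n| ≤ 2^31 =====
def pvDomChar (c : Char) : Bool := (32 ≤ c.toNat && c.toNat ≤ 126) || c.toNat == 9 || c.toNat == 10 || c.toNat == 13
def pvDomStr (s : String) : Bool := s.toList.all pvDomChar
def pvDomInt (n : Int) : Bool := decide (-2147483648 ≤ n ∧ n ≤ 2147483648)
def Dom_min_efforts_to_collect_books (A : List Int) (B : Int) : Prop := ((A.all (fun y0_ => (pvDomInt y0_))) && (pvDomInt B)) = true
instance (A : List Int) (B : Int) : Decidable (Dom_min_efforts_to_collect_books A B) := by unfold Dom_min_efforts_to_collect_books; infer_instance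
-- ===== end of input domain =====

-- B replaces A's sort + quadratic merge simulation by the closed form sum(A)-max(A) for B ≠ 0 (0 otherwise);
-- A sorts/mutates its argument list in place, so the equivalence proved here is about the RETURN value only.

-- ===== PORT A =====
-- the inner 'while j >= 0 and merge_count[j] == B: j -= 1' loop
def pvFindJ (mc : List Int) (B : Int) (j : Int) : Int :=
  if 0 ≤ j ∧ PySem.List.pyGetD mc j 0 = B then pvFindJ mc B (j - 1) else j
termination_by (j + 1).toNat
decreasing_by omega

-- one iteration of the 'for i in range(1, n)' loop; state = (A, merge_count, efforts);
-- all indices read/written are in range on every reachable state, so pyGetD _ _ 0 is exact here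
def pvStepA (B : Int) (st : List Int × List Int × Int) (i : Int) : List Int × List Int × Int :=
  let j := pvFindJ st.2.1 B (i - 1)
  if 0 ≤ j then
    let ai := PySem.List.pyGetD st.1 i 0
    let mcj := PySem.List.pyGetD st.2.1 j 0
    (st.1.set j.toNat (PySem.List.pyGetD st.1 j 0 + ai),
     st.2.1.set j.toNat (mcj + 1),
     st.2.2 + ai * (mcj + 1))
  else st

def min_efforts_to_collect_books (A : List Int) (B : Int) : Int :=
  let As := PySem.List.sorted A (fun x => x) true
  let n := As.length
  ((PySem.List.pyRange 1 n 1).foldl (pvStepA B) (As, List.replicate n 0, 0)).2.2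

-- ===== PORT B =====
def min_efforts_to_collect_books_alt (A : List Int) (B : Int) : Int :=
  if B = 0 ∨ A = [] then 0
  else A.sum - ((PySem.List.max? A (fun x => x)).getD 0)

-- ===== PRECONDITION & SPEC =====
def Spec_min_efforts_to_collect_books (A : List Int) (B : Int) (out : Int) : Prop := out = min_efforts_to_collect_books_alt A B
instance (A : List Int) (B : Int) (out : Int) : Decidable (Spec_min_efforts_to_collect_books A B out) := by unfold Spec_min_efforts_to_collect_books; infer_instance

-- ===== CLAIM (what is proved, stated in full; the proofs are below) =====
def Claim_equal_min_efforts_to_collect_books : Prop := ∀ (A : List Int) (B : Int), Dom_min_efforts_to_collect_books A B → Spec_min_efforts_to_collect_books A B (min_efforts_to_collect_books A B)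

-- ===== LEMMAS AND PROOFS =====

-- an all-zero merge_count reads as 0 at any index (in or out of range; the default is 0 too)
lemma rep0 (n : ℕ) (j : Int) : PySem.List.pyGetD (List.replicate n (0:Int)) j 0 = 0 := by
  cases h : PySem.List.pyGet? (List.replicate n (0:Int)) j with
  | none => simp [PySem.List.pyGetD, h]
  | some x =>
      have hx := PySem.List.mem_of_pyGet?_eq_some (List.replicate n (0:Int)) h
      simp [PySem.List.pyGetD, h, List.eq_of_mem_replicate hx]

-- with B = 0 the while-loop on an all-zero merge_count always runs below 0
lemma pvFindJ_zero (n : ℕ) (j : Int) : pvFindJ (List.replicate n 0) 0 j < 0 := by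
  by_cases hj : 0 ≤ j
  · obtain ⟨k, rfl⟩ : ∃ k : ℕ, j = (k : Int) := ⟨j.toNat, (Int.toNat_of_nonneg hj).symm⟩
    clear hj
    induction k with
    | zero => rw [pvFindJ, if_pos ⟨le_refl 0, rep0 n 0⟩, pvFindJ]; simp
    | succ k ih =>
        rw [pvFindJ, if_pos ⟨by positivity, rep0 n _⟩]
        have h1 : ((k+1 : ℕ) : Int) - 1 = (k : Int) := by push_cast; ring
        rw [h1]; exact ih
  · rw [pvFindJ, if_neg (by tauto)]; omega

lemma stepA_zero (n : ℕ) (L : List Int) (e : Int) (i : Int) :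
    pvStepA 0 (L, List.replicate n 0, e) i = (L, List.replicate n 0, e) := by
  rw [pvStepA]
  simp only []
  rw [if_neg (by have := pvFindJ_zero n (i-1); omega)]

-- for B ≠ 0 the while-loop stops immediately when merge_count[j] = 0
lemma pvFindJ_stop (mc : List Int) (B : Int) (j : Int) (hB : B ≠ 0)
    (h : PySem.List.pyGetD mc j 0 = 0) : pvFindJ mc B j = j := by
  rw [pvFindJ, if_neg]
  rintro ⟨-, h2⟩
  rw [h] at h2
  exact hB h2.symm

-- the state after processing i = 1 .. m (for B ≠ 0):
-- A has absorbed each successor into its predecessor up to index m, merge counts 0..m-1 are 1,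
-- efforts = sum of the sorted list's elements 1..m
def pvInv (L : List Int) (m : ℕ) : List Int × List Int × Int :=
  ((List.zipWith (· + ·) L (L.drop 1)).take m ++ L.drop m,
   List.replicate m 1 ++ List.replicate (L.length - m) 0,
   ((L.drop 1).take m).sum)

lemma mc_get (m b : ℕ) (hb : 0 < b) :
    PySem.List.pyGetD (List.replicate m (1:Int) ++ List.replicate b 0) (m:Int) 0 = 0 := by
  simp [List.getD, hb]

lemma am_len (L : List Int) (m : ℕ) (h : m + 1 ≤ L.length) :
    ((List.zipWith (· + ·) L (L.drop 1)).take m).length = m := by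
  simp [List.length_zipWith]; omega

lemma am_get (L : List Int) (m k : ℕ) (h : m + 1 ≤ L.length) (hk : m ≤ k) (hk2 : k < L.length) :
    PySem.List.pyGetD ((List.zipWith (· + ·) L (L.drop 1)).take m ++ L.drop m) (k:Int) 0 = L[k] := by
  simp only [PySem.List.pyGetD_natCast, List.getD]
  rw [List.getElem?_append_right (by rw [am_len L m h]; omega), am_len L m h,
      List.getElem?_drop]
  have : m + (k - m) = k := by omega
  simp [this, hk2]

lemma am_set (L : List Int) (m : ℕ) (h : m + 2 ≤ L.length) :
    ((List.zipWith (· + ·) L (L.drop 1)).take m ++ L.drop m).set m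
        (L[m]'(by omega) + L[m+1]'(by omega))
      = (List.zipWith (· + ·) L (L.drop 1)).take (m+1) ++ L.drop (m+1) := by
  have hlen := am_len L m (by omega)
  rw [List.set_append_right _ _ (by omega), hlen, Nat.sub_self,
      List.drop_eq_getElem_cons (by omega : m < L.length), List.set_cons_zero,
      List.take_succ]
  have hz : (List.zipWith (· + ·) L (L.drop 1))[m]? =
      some (L[m]'(by omega) + L[m+1]'(by omega)) := by
    rw [List.getElem?_zipWith']
    simp [(by omega : m < L.length), (by omega : m + 1 < L.length), List.getElem?_drop]
  rw [hz]
  simp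

lemma mc_set (n m : ℕ) (h : m + 1 ≤ n) :
    (List.replicate m (1:Int) ++ List.replicate (n - m) 0).set m (0 + 1)
      = List.replicate (m+1) 1 ++ List.replicate (n - (m+1)) 0 := by
  rw [List.set_append_right _ _ (by simp), List.length_replicate, Nat.sub_self]
  have : n - m = (n - (m+1)) + 1 := by omega
  rw [this, List.replicate_succ, List.set_cons_zero, List.replicate_succ' (n := m)]
  simp

lemma eff_step (L : List Int) (m : ℕ) (h : m + 2 ≤ L.length) :
    ((L.drop 1).take (m+1)).sum = ((L.drop 1).take m).sum + L[m+1]'(by omega) := by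
  rw [List.take_succ]
  have : (L.drop 1)[m]? = some (L[m+1]'(by omega)) := by
    rw [List.getElem?_drop]
    simp [(by omega : 1 + m < L.length)]
    congr 1
    omega
  rw [this]
  simp

lemma main_inv (L : List Int) (B : Int) (hB : B ≠ 0) (m : ℕ) (hm : m + 1 ≤ L.length) :
    (PySem.List.pyRange 1 ((m:Int) + 1) 1).foldl (pvStepA B) (L, List.replicate L.length 0, 0)
      = pvInv L m := by
  induction m with
  | zero => rw [PySem.List.pyRange_one_eq_nil (by norm_num)]; simp [pvInv]
  | succ m ih =>
      rw [show ((m+1:ℕ):Int) + 1 = ((m:Int)+1) + 1 by push_cast; ring,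
          PySem.List.pyRange_one_succ_right (by omega : (1:Int) ≤ (m:Int)+1),
          List.foldl_append, ih (by omega)]
      have hmc : PySem.List.pyGetD (pvInv L m).2.1 ((m:Int)) 0 = 0 := by
        rw [pvInv]; exact mc_get m _ (by omega)
      simp only [List.foldl_cons, List.foldl_nil]
      unfold pvStepA
      simp only [show ((m:Int)+1) - 1 = (m:Int) by ring,
        pvFindJ_stop _ _ _ hB hmc, if_pos (by positivity : (0:Int) ≤ (m:Int))]
      rw [pvInv, pvInv]
      simp only [Int.toNat_natCast]
      refine congrArg₂ Prod.mk ?_ (congrArg₂ Prod.mk ?_ ?_)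
      · rw [show ((m:Int)+1) = ((m+1:ℕ):Int) by push_cast; ring,
          am_get L m m (by omega) (le_refl m) (by omega),
          am_get L m (m+1) (by omega) (by omega) (by omega),
          am_set L m (by omega)]
      · have h0 : PySem.List.pyGetD (List.replicate m (1:Int) ++ List.replicate (L.length - m) 0) ((m:Int)) 0 = 0 :=
          mc_get m _ (by omega)
        rw [h0, mc_set L.length m (by omega)]
      · have h0 : PySem.List.pyGetD (List.replicate m (1:Int) ++ List.replicate (L.length - m) 0) ((m:Int)) 0 = 0 :=
          mc_get m _ (by omega)
        rw [h0, show ((m:Int)+1) = ((m+1:ℕ):Int) by push_cast; ring,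
          am_get L m (m+1) (by omega) (by omega) (by omega), eff_step L m (by omega)]
        ring

lemma foldl_const (L : List Int) (n : ℕ) (e : Int) (l : List Int) :
    l.foldl (pvStepA 0) (L, List.replicate n 0, e) = (L, List.replicate n 0, e) := by
  induction l with
  | nil => rfl
  | cons x xs ih => rw [List.foldl_cons, stepA_zero, ih]

-- ===== VERDICT (by name: the statement is the Claim_ definition above) =====
theorem min_efforts_to_collect_books_spec : Claim_equal_min_efforts_to_collect_books := by
  intro A B _
  unfold Spec_min_efforts_to_collect_books min_efforts_to_collect_books min_efforts_to_collect_books_alt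
  by_cases hB : B = 0
  · subst hB
    simp only [foldl_const]
    simp
  · by_cases hA : A = []
    · subst hA
      have hL : PySem.List.sorted ([]:List Int) (fun x => x) true = [] :=
        (PySem.List.sorted_perm _ _ _).eq_nil
      rw [if_pos (Or.inr rfl)]
      simp [hL, PySem.List.pyRange_one_eq_nil]
    · rw [if_neg (by tauto)]
      have hperm := PySem.List.sorted_perm A (fun x => x) true
      set L := PySem.List.sorted A (fun x => x) true with hLdef
      have hLne : L ≠ [] := fun h => hA (List.Perm.eq_nil (by rw [h] at hperm; exact hperm.symm))
      have hn : 0 < L.length := List.length_pos_of_ne_nil hLne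
      show ((PySem.List.pyRange 1 (L.length : Int) 1).foldl (pvStepA B)
        (L, List.replicate L.length 0, 0)).2.2 = _
      rw [show ((L.length : ℕ) : Int) = ((L.length - 1 : ℕ) : Int) + 1 by omega,
          main_inv L B hB (L.length - 1) (by omega)]
      show ((L.drop 1).take (L.length - 1)).sum = _
      rw [List.take_of_length_le (by simp)]
      cases hmax : PySem.List.max? A (fun x => x) with
      | none => exact absurd ((PySem.List.max?_eq_none_iff _ _).1 hmax) hA
      | some M =>
          have hMmem : M ∈ A := PySem.List.max?_mem hmax
          have hMmax : ∀ y ∈ A, y ≤ M := by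
            intro y hy; exact PySem.List.max?_isMax hmax y hy
          cases hL : L with
          | nil => exact absurd hL hLne
          | cons x t =>
              have hpw := PySem.List.sorted_pairwise_rev A (fun x => x)
              rw [← hLdef, hL, List.pairwise_cons] at hpw
              have hxM : x ≤ M := hMmax x (hperm.mem_iff.1 (by rw [hL]; simp))
              have hMx : M ≤ x := by
                have hML : M ∈ L := hperm.mem_iff.2 hMmem
                rw [hL] at hML
                rcases List.mem_cons.1 hML with h | h
                · omega
                · exact hpw.1 M h
              have hsum : L.sum = A.sum := hperm.sum_eq
              rw [hL] at hsum
              simp only [List.drop_succ_cons, List.drop_zero, Option.getD_some]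
              simp at hsum
              omega
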